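-- pv_equiv track=rewrite | github.com/buobo/scope_match | scope_match_9.2.py | _line_braces
-- ===== SOURCE A (Python) =====
-- def _line_braces(line, state):
--     result = []
--     quote = None
--     escaped = False
--     i = 0
--
--     while i < len(line):
--         ch = line[i]
--         nxt = line[i + 1] if i + 1 < len(line) else ""
--
--         if state["block_comment"]:
--             if ch == "*" and nxt == "/":
--                 state["block_comment"] = False
--                 i += 2
--                 continue
--             i += 1
--             continue
--
--         if quote is not None:
--             if escaped:
--                 escaped = False
--             elif ch == "\\":
--                 escaped = True
--             elif ch == quote:
--                 quote = None
--             i += 1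
--             continue
--
--         if ch == "/" and nxt == "/":
--             break
--         if ch == "/" and nxt == "*":
--             state["block_comment"] = True
--             i += 2
--             continue
--         if ch == '"' or ch == "'":
--             quote = ch
--             i += 1
--             continue
--         if ch == "{" or ch == "}":
--             result.append((i, ch))
--         i += 1
--
--     return result
-- ===== SOURCE B (Python) =====
-- def _line_braces(line, state):
--     # Token-at-a-time scanner: jumps over whole strings/comments via find/startswith
--     # instead of a per-character flag machine.  Mutates state["block_comment"] like A.
--     result = []
--     n = len(line)
--     i = 0
--     if state["block_comment"]:
--         end = line.find("*/")
--         if end == -1: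
--             return result
--         state["block_comment"] = False
--         i = end + 2
--     while i < n:
--         ch = line[i]
--         if ch == '"' or ch == "'":
--             j = i + 1
--             while j < n:
--                 if line[j] == "\\":
--                     j += 2
--                 elif line[j] == ch:
--                     j += 1
--                     break
--                 else:
--                     j += 1
--             i = j
--         elif line.startswith("//", i):
--             break
--         elif line.startswith("/*", i):
--             end = line.find("*/", i + 2)
--             if end == -1:
--                 state["block_comment"] = True
--                 break
--             i = end + 2
--         else:
--             if ch == "{" or ch == "}":
--                 result.append((i, ch))
--             i += 1
--     return result
-- ===== Notes on version B (the rewrite author's own statement) =====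
-- stated objective: alternative
-- what changed: Replaced A's per-character state machine (block/quote/escaped flags tested on every char) by a token-at-a-time scanner that jumps over whole string literals and block comments with find/startswith and only dispatches at token starts.
-- outside the precondition, e.g. on _line_braces('', {}): A returns [], B raises KeyError
import Mathlib
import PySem

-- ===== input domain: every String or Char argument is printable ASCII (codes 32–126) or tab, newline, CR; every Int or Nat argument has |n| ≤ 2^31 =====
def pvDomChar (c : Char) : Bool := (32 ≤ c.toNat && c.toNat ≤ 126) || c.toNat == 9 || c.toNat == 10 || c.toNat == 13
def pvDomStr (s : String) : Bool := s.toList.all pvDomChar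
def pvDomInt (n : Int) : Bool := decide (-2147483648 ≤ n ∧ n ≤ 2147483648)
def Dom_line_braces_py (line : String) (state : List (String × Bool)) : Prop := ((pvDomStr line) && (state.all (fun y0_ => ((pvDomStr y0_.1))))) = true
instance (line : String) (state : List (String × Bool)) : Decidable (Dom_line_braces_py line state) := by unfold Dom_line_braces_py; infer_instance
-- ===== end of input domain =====

-- Both Pythons mutate state["block_comment"] in place (identically); the equivalence proved
-- here is about the RETURN value.  B is an alternative algorithm: a token-at-a-time scanner
-- (jump over whole strings/comments) instead of A's per-character flag machine.
-- Loops are ported as structural recursion on a fuel bound (fuel = length of the line,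
-- always sufficient since the index advances every iteration); this only makes the same
-- computation total, it changes no value.

-- ===== PORT A =====
-- Python dict lookup on the assoc list (first match); KeyError = none.
def pvLookupBC (state : List (String × Bool)) : Option Bool :=
  (state.find? (fun p => p.1 == "block_comment")).map (·.2)

-- literal transliteration of A's while-loop: i, block_comment, quote, escaped, result
def lineBracesALoop (cs : List Char) : Nat → Nat → Bool → Option Char → Bool →
    List (Int × String) → List (Int × String)
  | 0, _, _, _, _, result => result
  | fuel+1, i, block, quote, escaped, result =>
    if h : i < cs.length then
      let ch := cs[i]
      let nxt : Option Char := cs[i+1]?          -- Python's "" sentinel becomes none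
      if block then
        if ch = '*' ∧ nxt = some '/' then
          lineBracesALoop cs fuel (i+2) false quote escaped result
        else
          lineBracesALoop cs fuel (i+1) block quote escaped result
      else
        match quote with
        | some q =>
          if escaped then lineBracesALoop cs fuel (i+1) block quote false result
          else if ch = '\\' then lineBracesALoop cs fuel (i+1) block quote true result
          else if ch = q then lineBracesALoop cs fuel (i+1) block none escaped result
          else lineBracesALoop cs fuel (i+1) block quote escaped result
        | none =>
          if ch = '/' ∧ nxt = some '/' then result
          else if ch = '/' ∧ nxt = some '*' then
            lineBracesALoop cs fuel (i+2) true quote escaped result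
          else if ch = '"' ∨ ch = '\'' then
            lineBracesALoop cs fuel (i+1) block (some ch) escaped result
          else if ch = '{' ∨ ch = '}' then
            lineBracesALoop cs fuel (i+1) block quote escaped (result ++ [((i : Int), String.singleton ch)])
          else
            lineBracesALoop cs fuel (i+1) block quote escaped result
    else result

def line_braces_py (line : String) (state : List (String × Bool)) : List (Int × String) :=
  match pvLookupBC state with
  | none => []                                  -- KeyError in Python; excluded by Pre_
  | some b => lineBracesALoop line.toList line.toList.length 0 b none false []

-- ===== PORT B =====
-- line.find("*/", k) : first index e ≥ k with cs[e]='*' and cs[e+1]='/'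
def pvFindClose (cs : List Char) : Nat → Nat → Option Nat
  | 0, _ => none
  | fuel+1, k =>
    if h : k + 1 < cs.length then
      if cs[k] = '*' ∧ cs[k+1] = '/' then some k
      else pvFindClose cs fuel (k+1)
    else none

-- B's inner while: skip to just past the closing quote q, jumping 2 on backslash
def pvSkipStr (cs : List Char) (q : Char) : Nat → Nat → Nat
  | 0, j => j
  | fuel+1, j =>
    if h : j < cs.length then
      if cs[j] = '\\' then pvSkipStr cs q fuel (j+2)
      else if cs[j] = q then j + 1
      else pvSkipStr cs q fuel (j+1)
    else j

-- B's main while loop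
def lineBracesBLoop (cs : List Char) : Nat → Nat → List (Int × String) → List (Int × String)
  | 0, _, result => result
  | fuel+1, i, result =>
    if h : i < cs.length then
      let ch := cs[i]
      if ch = '"' ∨ ch = '\'' then
        lineBracesBLoop cs fuel (pvSkipStr cs ch cs.length (i+1)) result
      else if ch = '/' ∧ cs[i+1]? = some '/' then result
      else if ch = '/' ∧ cs[i+1]? = some '*' then
        match pvFindClose cs cs.length (i+2) with
        | some e => lineBracesBLoop cs fuel (e+2) result
        | none => result
      else
        lineBracesBLoop cs fuel (i+1)
          (result ++ if ch = '{' ∨ ch = '}' then [((i : Int), String.singleton ch)] else [])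
    else result

def line_braces_py_alt (line : String) (state : List (String × Bool)) : List (Int × String) :=
  let cs := line.toList
  match pvLookupBC state with
  | none => []                                  -- KeyError in Python; excluded by Pre_
  | some b =>
    if b then
      match pvFindClose cs cs.length 0 with
      | none => []
      | some e => lineBracesBLoop cs cs.length (e+2) []
    else lineBracesBLoop cs cs.length 0 []

-- ===== PRECONDITION & SPEC =====
-- Pre_ excludes the inputs where state has no "block_comment" key: both Pythons read it
-- up front except that A, reading it only inside the loop, accidentally returns [] when the
-- line is empty; B naturally raises KeyError there.
def Pre_line_braces_py (line : String) (state : List (String × Bool)) : Prop :=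
  (pvLookupBC state).isSome = true
instance (line : String) (state : List (String × Bool)) : Decidable (Pre_line_braces_py line state) := by unfold Pre_line_braces_py; infer_instance

def pvWitness_line_braces_py : String × (List (String × Bool)) :=
  ("a{ /*x*/ }b", [("block_comment", false)])

def Spec_line_braces_py (line : String) (state : List (String × Bool)) (out : List (Int × String)) : Prop := out = line_braces_py_alt line state
instance (line : String) (state : List (String × Bool)) (out : List (Int × String)) : Decidable (Spec_line_braces_py line state out) := by unfold Spec_line_braces_py; infer_instance

-- ===== CLAIM (what is proved, stated in full; the proofs are below) =====
def Claim_equal_line_braces_py : Prop := ∀ (line : String) (state : List (String × Bool)), Dom_line_braces_py line state → Pre_line_braces_py line state → Spec_line_braces_py line state (line_braces_py line state)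

-- ===== LEMMAS AND PROOFS =====

-- exhausted index: every loop/scan returns its current accumulator
theorem aloop_stop (cs : List Char) (f i : Nat) (b : Bool) (q : Option Char) (e : Bool)
    (r : List (Int × String)) (h : ¬ i < cs.length) :
    lineBracesALoop cs f i b q e r = r := by
  cases f with
  | zero => rfl
  | succ f => rw [lineBracesALoop, dif_neg h]

theorem bloop_stop (cs : List Char) (f i : Nat) (r : List (Int × String))
    (h : ¬ i < cs.length) : lineBracesBLoop cs f i r = r := by
  cases f with
  | zero => rfl
  | succ f => rw [lineBracesBLoop, dif_neg h]

theorem find_stop (cs : List Char) (f k : Nat) (h : ¬ k + 1 < cs.length) :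
    pvFindClose cs f k = none := by
  cases f with
  | zero => rfl
  | succ f => rw [pvFindClose, dif_neg h]

theorem skip_stop (cs : List Char) (q : Char) (f j : Nat) (h : ¬ j < cs.length) :
    pvSkipStr cs q f j = j := by
  cases f with
  | zero => rfl
  | succ f => rw [pvSkipStr, dif_neg h]

-- lower bounds on the scanners' results
theorem skip_ge (cs : List Char) (q : Char) (f j : Nat) : j ≤ pvSkipStr cs q f j := by
  induction f generalizing j with
  | zero => simp [pvSkipStr]
  | succ f ih =>
    rw [pvSkipStr]
    by_cases h : j < cs.length
    · rw [dif_pos h]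
      split_ifs
      · exact le_trans (by omega) (ih (j+2))
      · omega
      · exact le_trans (by omega) (ih (j+1))
    · rw [dif_neg h]

theorem find_ge (cs : List Char) (f k e : Nat) (he : pvFindClose cs f k = some e) : k ≤ e := by
  induction f generalizing k with
  | zero => simp [pvFindClose] at he
  | succ f ih =>
    rw [pvFindClose] at he
    by_cases h : k + 1 < cs.length
    · rw [dif_pos h] at he
      by_cases hc : cs[k] = '*' ∧ cs[k+1] = '/'
      · rw [if_pos hc] at he; simp at he; omega
      · rw [if_neg hc] at he; have := ih (k+1) he; omega
    · rw [dif_neg h] at he; simp at he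

-- fuel irrelevance: with enough fuel the value does not depend on the fuel
theorem skip_irrel (cs : List Char) (q : Char) (f f' j : Nat)
    (hf : cs.length ≤ j + f) (hf' : cs.length ≤ j + f') :
    pvSkipStr cs q f j = pvSkipStr cs q f' j := by
  induction f generalizing f' j with
  | zero => rw [skip_stop cs q 0 j (by omega), skip_stop cs q f' j (by omega)]
  | succ f ih =>
    by_cases h : j < cs.length
    · obtain ⟨f'', rfl⟩ : ∃ f'', f' = f'' + 1 := ⟨f' - 1, by omega⟩
      rw [pvSkipStr, pvSkipStr, dif_pos h, dif_pos h]
      split_ifs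
      · exact ih f'' (j+2) (by omega) (by omega)
      · rfl
      · exact ih f'' (j+1) (by omega) (by omega)
    · rw [skip_stop cs q _ j h, skip_stop cs q f' j h]

theorem find_irrel (cs : List Char) (f f' k : Nat)
    (hf : cs.length ≤ k + f) (hf' : cs.length ≤ k + f') :
    pvFindClose cs f k = pvFindClose cs f' k := by
  induction f generalizing f' k with
  | zero => rw [find_stop cs 0 k (by omega), find_stop cs f' k (by omega)]
  | succ f ih =>
    by_cases h : k + 1 < cs.length
    · obtain ⟨f'', rfl⟩ : ∃ f'', f' = f'' + 1 := ⟨f' - 1, by omega⟩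
      rw [pvFindClose, pvFindClose, dif_pos h, dif_pos h]
      split_ifs
      · rfl
      · exact ih f'' (k+1) (by omega) (by omega)
    · rw [find_stop cs _ k h, find_stop cs f' k h]

theorem aloop_irrel (cs : List Char) (f f' i : Nat) (b : Bool) (q : Option Char) (e : Bool)
    (r : List (Int × String)) (hf : cs.length ≤ i + f) (hf' : cs.length ≤ i + f') :
    lineBracesALoop cs f i b q e r = lineBracesALoop cs f' i b q e r := by
  induction f generalizing f' i b q e r with
  | zero => rw [aloop_stop cs 0 i b q e r (by omega), aloop_stop cs f' i b q e r (by omega)]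
  | succ f ih =>
    by_cases h : i < cs.length
    · obtain ⟨f'', rfl⟩ : ∃ f'', f' = f'' + 1 := ⟨f' - 1, by omega⟩
      rw [lineBracesALoop, lineBracesALoop, dif_pos h, dif_pos h]
      cases q with
      | some qc =>
        simp only []
        split_ifs <;> first
          | rfl
          | exact ih f'' _ _ _ _ _ (by omega) (by omega)
      | none =>
        simp only []
        split_ifs <;> first
          | rfl
          | exact ih f'' _ _ _ _ _ (by omega) (by omega)
    · rw [aloop_stop cs _ i b q e r h, aloop_stop cs f' i b q e r h]

theorem bloop_irrel (cs : List Char) (f f' i : Nat) (r : List (Int × String))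
    (hf : cs.length ≤ i + f) (hf' : cs.length ≤ i + f') :
    lineBracesBLoop cs f i r = lineBracesBLoop cs f' i r := by
  induction f generalizing f' i r with
  | zero => rw [bloop_stop cs 0 i r (by omega), bloop_stop cs f' i r (by omega)]
  | succ f ih =>
    by_cases h : i < cs.length
    · obtain ⟨f'', rfl⟩ : ∃ f'', f' = f'' + 1 := ⟨f' - 1, by omega⟩
      rw [lineBracesBLoop, lineBracesBLoop, dif_pos h, dif_pos h]
      simp only []
      split_ifs
      · exact ih f'' _ _ (by have := skip_ge cs cs[i] cs.length (i+1); omega) (by have := skip_ge cs cs[i] cs.length (i+1); omega)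
      · rfl
      · cases hfc : pvFindClose cs cs.length (i+2) with
        | none => rfl
        | some e =>
          have := find_ge cs cs.length (i+2) e hfc
          exact ih f'' _ _ (by omega) (by omega)
      · exact ih f'' _ _ (by omega) (by omega)
      · exact ih f'' _ _ (by omega) (by omega)
    · rw [bloop_stop cs _ i r h, bloop_stop cs f' i r h]

-- In block-comment mode A scans char by char for "*/"; that equals B's pvFindClose jump.
theorem aloop_block (cs : List Char) (f i : Nat) (result : List (Int × String))
    (hf : cs.length ≤ i + f) :
    lineBracesALoop cs f i true none false result =
      match pvFindClose cs cs.length i with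
      | some e => lineBracesALoop cs cs.length (e+2) false none false result
      | none => result := by
  induction f generalizing i with
  | zero =>
    rw [aloop_stop cs 0 i _ _ _ _ (by omega), find_stop cs cs.length i (by omega)]
  | succ f ih =>
    by_cases h : i < cs.length
    · rw [lineBracesALoop, dif_pos h]
      simp only [reduceIte]
      by_cases h2 : i + 1 < cs.length
      · have hnx : cs[i+1]? = some cs[i+1] := List.getElem?_eq_getElem h2
        obtain ⟨g, hg⟩ : ∃ g, cs.length = g + 1 := ⟨cs.length - 1, by omega⟩
        by_cases hc : cs[i] = '*' ∧ cs[i+1] = '/'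
        · have hcond : cs[i] = '*' ∧ cs[i+1]? = some '/' := ⟨hc.1, by rw [hnx, hc.2]⟩
          rw [if_pos hcond]
          have hfind : pvFindClose cs cs.length i = some i := by
            rw [hg, pvFindClose, dif_pos h2, if_pos hc]
          rw [hfind]
          exact aloop_irrel cs f cs.length (i+2) false none false result (by omega) (by omega)
        · have hcond : ¬ (cs[i] = '*' ∧ cs[i+1]? = some '/') := by
            simp only [hnx, Option.some.injEq]
            exact hc
          rw [if_neg hcond]
          rw [ih (i+1) (by omega)]
          have hfind : pvFindClose cs cs.length i = pvFindClose cs cs.length (i+1) := by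
            conv_lhs => rw [hg, pvFindClose, dif_pos h2, if_neg hc]
            exact find_irrel cs g cs.length (i+1) (by omega) (by omega)
          rw [hfind]
      · have hnx : cs[i+1]? = none := List.getElem?_eq_none (by omega)
        have hcond : ¬ (cs[i] = '*' ∧ cs[i+1]? = some '/') := by simp [hnx]
        rw [if_neg hcond]
        rw [ih (i+1) (by omega)]
        rw [find_stop cs cs.length i h2, find_stop cs cs.length (i+1) (by omega)]
    · rw [aloop_stop cs _ i _ _ _ _ h, find_stop cs cs.length i (by omega)]

-- In quote mode A's escaped flag machine equals B's pvSkipStr jump.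
theorem aloop_quote (cs : List Char) (q : Char) (f i : Nat) (result : List (Int × String))
    (hf : cs.length ≤ i + f) :
    lineBracesALoop cs f i false (some q) false result =
      lineBracesALoop cs cs.length (pvSkipStr cs q cs.length i) false none false result := by
  induction f generalizing i with
  | zero =>
    rw [aloop_stop cs 0 i _ _ _ _ (by omega), skip_stop cs q cs.length i (by omega),
      aloop_stop cs cs.length i _ _ _ _ (by omega)]
  | succ f ih =>
    by_cases h : i < cs.length
    · obtain ⟨g, hg⟩ : ∃ g, cs.length = g + 1 := ⟨cs.length - 1, by omega⟩
      by_cases hb : cs[i] = '\\'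
      · have hL : lineBracesALoop cs (f+1) i false (some q) false result =
            lineBracesALoop cs f (i+1) false (some q) true result := by
          rw [lineBracesALoop, dif_pos h]
          simp [hb]
        have hR : pvSkipStr cs q cs.length i = pvSkipStr cs q cs.length (i+2) := by
          conv_lhs => rw [hg, pvSkipStr, dif_pos h, if_pos hb]
          exact skip_irrel cs q g cs.length (i+2) (by omega) (by omega)
        rw [hL, hR]
        by_cases h1 : i + 1 < cs.length
        · obtain ⟨f', rfl⟩ : ∃ f', f = f' + 1 := ⟨f - 1, by omega⟩
          have hL2 : lineBracesALoop cs (f'+1) (i+1) false (some q) true result =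
              lineBracesALoop cs f' (i+2) false (some q) false result := by
            rw [lineBracesALoop, dif_pos h1]
            simp
          rw [hL2,
            aloop_irrel cs f' (f'+1) (i+2) false (some q) false result (by omega) (by omega)]
          exact ih (i+2) (by omega)
        · rw [aloop_stop cs f (i+1) _ _ _ _ h1, skip_stop cs q cs.length (i+2) (by omega),
            aloop_stop cs cs.length (i+2) _ _ _ _ (by omega)]
      · by_cases hq : cs[i] = q
        · have hb' : ¬ q = '\\' := hq ▸ hb
          have hL : lineBracesALoop cs (f+1) i false (some q) false result =
              lineBracesALoop cs f (i+1) false none false result := by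
            rw [lineBracesALoop, dif_pos h]
            simp [hq, hb']
          have hR : pvSkipStr cs q cs.length i = i + 1 := by
            rw [hg, pvSkipStr, dif_pos h, if_neg (by rw [hq]; exact hb'), if_pos hq]
          rw [hL, hR]
          exact aloop_irrel cs f cs.length (i+1) false none false result (by omega) (by omega)
        · have hL : lineBracesALoop cs (f+1) i false (some q) false result =
              lineBracesALoop cs f (i+1) false (some q) false result := by
            rw [lineBracesALoop, dif_pos h]
            simp [hb, hq]
          have hR : pvSkipStr cs q cs.length i = pvSkipStr cs q cs.length (i+1) := by
            conv_lhs => rw [hg, pvSkipStr, dif_pos h, if_neg hb, if_neg hq]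
            exact skip_irrel cs q g cs.length (i+1) (by omega) (by omega)
          rw [hL, hR]
          exact ih (i+1) (by omega)
    · rw [aloop_stop cs _ i _ _ _ _ h, skip_stop cs q cs.length i h,
        aloop_stop cs cs.length i _ _ _ _ h]

-- Main loop correspondence.
theorem aloop_main (cs : List Char) (f i : Nat) (result : List (Int × String))
    (hf : cs.length ≤ i + f) :
    lineBracesALoop cs f i false none false result =
      lineBracesBLoop cs cs.length i result := by
  induction f generalizing i result with
  | zero =>
    rw [aloop_stop cs 0 i _ _ _ _ (by omega), bloop_stop cs cs.length i result (by omega)]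
  | succ f ih =>
    by_cases h : i < cs.length
    · obtain ⟨g, hg⟩ : ∃ g, cs.length = g + 1 := ⟨cs.length - 1, by omega⟩
      by_cases hq : cs[i] = '"' ∨ cs[i] = '\''
      · have hs : (cs[i] = '/') = False := by
          rcases hq with hq | hq <;> simp [hq]
        have hL : lineBracesALoop cs (f+1) i false none false result =
            lineBracesALoop cs f (i+1) false (some cs[i]) false result := by
          rw [lineBracesALoop, dif_pos h]
          simp [hs, hq]
        have hB : lineBracesBLoop cs cs.length i result =
            lineBracesBLoop cs g (pvSkipStr cs cs[i] cs.length (i+1)) result := by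
          conv_lhs => rw [hg, lineBracesBLoop, dif_pos h]
          simp [hq]
        rw [hL, aloop_quote cs cs[i] f (i+1) result (by omega), hB]
        have hge := skip_ge cs cs[i] cs.length (i+1)
        rw [bloop_irrel cs g cs.length _ result (by omega) (by omega),
          aloop_irrel cs cs.length f _ false none false result (by omega) (by omega)]
        exact ih _ result (by omega)
      · by_cases hsl : cs[i] = '/' ∧ cs[i+1]? = some '/'
        · have hL : lineBracesALoop cs (f+1) i false none false result = result := by
            rw [lineBracesALoop, dif_pos h]
            simp [hsl.1, hsl.2]
          have hB : lineBracesBLoop cs cs.length i result = result := by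
            conv_lhs => rw [hg, lineBracesBLoop, dif_pos h]
            simp [hsl.1, hsl.2]
          rw [hL, hB]
        · by_cases hst : cs[i] = '/' ∧ cs[i+1]? = some '*'
          · have hL : lineBracesALoop cs (f+1) i false none false result =
                lineBracesALoop cs f (i+2) true none false result := by
              rw [lineBracesALoop, dif_pos h]
              simp [hst.1, hst.2]
            have hB : lineBracesBLoop cs cs.length i result =
                match pvFindClose cs cs.length (i+2) with
                | some e => lineBracesBLoop cs g (e+2) result
                | none => result := by
              conv_lhs => rw [hg, lineBracesBLoop, dif_pos h]
              simp [hst.1, hst.2]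
            rw [hL, aloop_block cs f (i+2) result (by omega), hB]
            cases hfc : pvFindClose cs cs.length (i+2) with
            | none => rfl
            | some e =>
              have hge := find_ge cs cs.length (i+2) e hfc
              simp only []
              rw [bloop_irrel cs g cs.length (e+2) result (by omega) (by omega),
                aloop_irrel cs cs.length f (e+2) false none false result (by omega) (by omega)]
              exact ih (e+2) result (by omega)
          · have hL : lineBracesALoop cs (f+1) i false none false result =
                lineBracesALoop cs f (i+1) false none false
                  (result ++ if cs[i] = '{' ∨ cs[i] = '}' then [((i : Int), String.singleton cs[i])] else []) := by
              rw [lineBracesALoop, dif_pos h]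
              by_cases hbr : cs[i] = '{' ∨ cs[i] = '}'
              · rcases hbr with hbr | hbr <;> simp [hbr]
              · simp [hbr, hsl, hst, hq]
            have hB : lineBracesBLoop cs cs.length i result =
                lineBracesBLoop cs g (i+1)
                  (result ++ if cs[i] = '{' ∨ cs[i] = '}' then [((i : Int), String.singleton cs[i])] else []) := by
              conv_lhs => rw [hg, lineBracesBLoop, dif_pos h]
              simp [hq, hsl, hst]
            rw [hL, hB, bloop_irrel cs g cs.length (i+1) _ (by omega) (by omega)]
            exact ih (i+1) _ (by omega)
    · rw [aloop_stop cs _ i _ _ _ _ h, bloop_stop cs cs.length i result h]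

-- ===== VERDICT (by name: the statement is the Claim_ definition above) =====
theorem line_braces_py_spec : Claim_equal_line_braces_py := by
  intro line state _ hpre
  unfold Spec_line_braces_py line_braces_py line_braces_py_alt
  cases hb : pvLookupBC state with
  | none => simp [Pre_line_braces_py, hb] at hpre
  | some b =>
    cases b with
    | false => simpa using aloop_main line.toList line.toList.length 0 [] (by omega)
    | true =>
      simp only []
      rw [aloop_block line.toList line.toList.length 0 [] (by omega)]
      cases h : pvFindClose line.toList line.toList.length 0 with
      | none => simp
      | some e =>
        simpa using aloop_main line.toList line.toList.length (e+2) [] (by omega)
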